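-- pv_equiv track=rewrite | github.com/SinghTejveer/stepic_python_in_action_eng | solutions/s152.py | solve
-- ===== SOURCE A (Python) =====
-- def solve(data):
--     length = 0
--     for item in data:
--         if item == 0:
--             break
--         else:
--             length += 1
--     return length
-- ===== SOURCE B (Python) =====
-- def solve(data):
--     lst = list(data)
--
--     def go(seg):
--         # length of the zero-free prefix of seg, by divide and conquer
--         if len(seg) <= 1:
--             return 0 if (seg and seg[0] == 0) else len(seg)
--         mid = len(seg) // 2
--         left = go(seg[:mid])
--         if left < mid:
--             return left
--         return left + go(seg[mid:])
--
--     return go(lst)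
-- ===== Notes on version B (the rewrite author's own statement) =====
-- stated objective: alternative
-- what changed: Replaces the single counting loop that breaks at the first zero with a divide-and-conquer recursion: split the list at the midpoint, compute the zero-free prefix length of the left half, and only recurse into the right half when the left half is entirely zero-free.
import Mathlib
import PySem

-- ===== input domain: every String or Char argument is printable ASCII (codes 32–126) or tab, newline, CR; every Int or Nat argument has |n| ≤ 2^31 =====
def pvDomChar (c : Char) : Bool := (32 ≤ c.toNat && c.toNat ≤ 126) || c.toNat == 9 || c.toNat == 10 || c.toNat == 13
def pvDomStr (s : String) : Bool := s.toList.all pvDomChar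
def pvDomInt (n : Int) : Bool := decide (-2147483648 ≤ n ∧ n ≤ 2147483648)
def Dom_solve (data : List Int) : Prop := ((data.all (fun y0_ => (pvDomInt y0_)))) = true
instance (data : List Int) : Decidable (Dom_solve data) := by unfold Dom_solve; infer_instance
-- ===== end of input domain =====

-- B computes the zero-free prefix length by divide-and-conquer (split at the midpoint, recurse into the right half only when the left half is zero-free) instead of A's single counting loop with break; alternative decomposition, same result.


-- ===== PORT A =====
-- the for-loop with break, carrying the running `length` accumulator
def solveLoop (items : List Int) (length : Int) : Int :=
  match items with
  | [] => length
  | item :: rest => if item == 0 then length else solveLoop rest (length + 1)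

def solve (data : List Int) : Int := solveLoop data 0

-- ===== PORT B =====
-- Source B's `go(seg)`: base cases len(seg) <= 1, otherwise mid = len(seg)//2,
-- left = go(seg[:mid]); if left < mid return left else left + go(seg[mid:]).
-- `fuel` (= the list length at the top call) only makes the recursion structural;
-- it is never exhausted on the calls solve_alt makes.
def solveGo : Nat → List Int → Int
  | _, [] => 0
  | _, [x] => if x == 0 then 0 else 1
  | 0, _ :: _ :: _ => 0
  | f + 1, x :: y :: rest =>
    let mid := (x :: y :: rest).length / 2
    let left := solveGo f ((x :: y :: rest).take mid)
    if left < (mid : Int) then left else left + solveGo f ((x :: y :: rest).drop mid)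

def solve_alt (data : List Int) : Int := solveGo data.length data

-- ===== PRECONDITION & SPEC =====
def Spec_solve (data : List Int) (out : Int) : Prop := out = solve_alt data
instance (data : List Int) (out : Int) : Decidable (Spec_solve data out) := by unfold Spec_solve; infer_instance

-- ===== CLAIM (what is proved, stated in full; the proofs are below) =====
def Claim_equal_solve : Prop := ∀ (data : List Int), Dom_solve data → Spec_solve data (solve data)

-- ===== LEMMAS AND PROOFS =====
-- the common characterisation: length of the zero-free prefix
def pfx (l : List Int) : Int := ((l.takeWhile (fun x => !(x == 0))).length : Int)

lemma pfx_le (l : List Int) : pfx l ≤ (l.length : Int) := by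
  unfold pfx
  have : (l.takeWhile (fun x => !(x == 0))).length ≤ l.length := by
    induction l with
    | nil => simp
    | cons x xs ih => simp [List.takeWhile_cons]; split <;> simp; omega
  exact_mod_cast this

lemma pfx_append (a b : List Int) :
    pfx (a ++ b) = if pfx a = (a.length : Int) then (a.length : Int) + pfx b else pfx a := by
  induction a with
  | nil => simp [pfx]
  | cons x xs ih =>
    by_cases h : x = 0
    · have hlen : ¬ (pfx (x :: xs) = ((x :: xs).length : Int)) := by
        simp [pfx, h]
        omega
      simp only [hlen, if_false]
      simp [pfx, h]
    · have hx : (!(x == 0)) = true := by simp [h]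
      simp only [pfx, List.cons_append, List.takeWhile_cons, hx, if_true, List.length_cons] at *
      push_cast at *
      by_cases he : ((xs.takeWhile (fun x => !(x == 0))).length : Int) = (xs.length : Int)
      · rw [ih]; simp [he]; ring
      · rw [ih]; simp [he]

lemma solveLoop_eq (l : List Int) (n : Int) : solveLoop l n = n + pfx l := by
  induction l generalizing n with
  | nil => simp [solveLoop, pfx]
  | cons x xs ih =>
    by_cases h : x = 0
    · simp [solveLoop, pfx, h]
    · have hx : (!(x == 0)) = true := by simp [h]
      simp only [solveLoop, beq_iff_eq, h, if_false, ih, pfx, List.takeWhile_cons, hx,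
        if_true, List.length_cons]
      push_cast
      ring

lemma solveGo_eq (n : Nat) (l : List Int) (hl : l.length ≤ n) : solveGo n l = pfx l := by
  induction n generalizing l with
  | zero =>
    have : l = [] := List.length_eq_zero_iff.mp (Nat.le_zero.mp hl)
    subst this; simp [solveGo, pfx]
  | succ n ih =>
    match l with
    | [] => simp [solveGo, pfx]
    | [x] => by_cases h : x = 0 <;> simp [solveGo, pfx, h]
    | x :: y :: rest =>
      show (let mid := (x :: y :: rest).length / 2
            let left := solveGo n ((x :: y :: rest).take mid)
            if left < (mid : Int) then left else left + solveGo n ((x :: y :: rest).drop mid))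
           = pfx (x :: y :: rest)
      set seg := x :: y :: rest with hseg
      set mid := seg.length / 2 with hmid
      have hlen : seg.length = rest.length + 2 := by simp [hseg]
      have hmid1 : 1 ≤ mid := by omega
      have hmidlt : mid < seg.length := by omega
      have htake : (seg.take mid).length = mid := by simp [List.length_take]; omega
      have hdrop : (seg.drop mid).length = seg.length - mid := by simp
      have hln : seg.length ≤ n + 1 := hl
      have ihl : solveGo n (seg.take mid) = pfx (seg.take mid) := ih _ (by omega)
      have ihr : solveGo n (seg.drop mid) = pfx (seg.drop mid) := ih _ (by omega)
      simp only [ihl, ihr]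
      have hsplit := pfx_append (seg.take mid) (seg.drop mid)
      rw [List.take_append_drop, htake] at hsplit
      by_cases hlt : pfx (seg.take mid) < (mid : Int)
      · have hne : pfx (seg.take mid) ≠ (mid : Int) := by omega
        rw [hsplit]; simp [hlt, hne]
      · have hle : pfx (seg.take mid) ≤ (mid : Int) := by
          have := pfx_le (seg.take mid); rwa [htake] at this
        have heq : pfx (seg.take mid) = (mid : Int) := le_antisymm hle (by omega)
        rw [hsplit]; simp [heq]

-- ===== VERDICT (by name: the statement is the Claim_ definition above) =====
theorem solve_spec : Claim_equal_solve := by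
  intro data _
  unfold Spec_solve solve solve_alt
  rw [solveLoop_eq, solveGo_eq _ _ le_rfl]
  ring
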